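-- pv_equiv track=rewrite | github.com/BigAngryDinosaur/amazonoa | turnstile/solution.py | getTimes
-- ===== SOURCE A (Python) =====
-- from typing import List
--
-- def getTimes(numCustomers: int, time: List[int], direction: List[int]) -> List[int]:
--     en, ex = [], []
--     res = [0] * len(time)
--     for i, t in enumerate(time):
--         if direction[i] == 1:
--             ex.append([time[i], i])
--         else:
--             en.append([time[i], i])
--
--     timeCounter, lastTurn = 0, -1  # time is 0 at the beginning and -1
--     # indicates nothing happened at prior time
--     while ex or en:
--         # Process the exit queue if and only if following conditions are satisfied
--         # If exit queue is not empty and the person at the front of the queue can go out based on his time stamp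
--         # and ( Nothing happened at last time stamp i.e. nobody moved in or out so lastTurn will be -1 in this case
--         # or, somebody moved out at last time stamp, in this case lastTurn will be 1
--         # or, nobody is there in the entrance queue
--         # or, at last time stamp somebody got in but the person at the front of the queue can't go in due to their timestamp
--         if (
--             ex
--             and ex[0][0] <= timeCounter
--             and (
--                 lastTurn == -1
--                 or lastTurn == 1
--                 or not en
--                 or (lastTurn == 0 and en[0][0] > timeCounter)
--             )
--         ):
--             res[ex[0][1]] = timeCounter
--             lastTurn = 1
--             ex.pop(0)
--         elif en and en[0][0] <= timeCounter:
--             res[en[0][1]] = timeCounter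
--             lastTurn = 0
--             en.pop(0)
--         else:
--             lastTurn = -1
--
--         timeCounter += 1
--
--     return res
-- ===== SOURCE B (Python) =====
-- from typing import List
--
-- def getTimes(numCustomers: int, time: List[int], direction: List[int]) -> List[int]:
--     # O(n): index pointers instead of pop(0), and idle time is skipped in one
--     # jump to the next front timestamp instead of ticking one second at a time.
--     res = [0] * len(time)
--     ex = [(t, i) for i, (t, d) in enumerate(zip(time, direction)) if d == 1]
--     en = [(t, i) for i, (t, d) in enumerate(zip(time, direction)) if d != 1]
--     i = j = 0
--     tc, last = 0, -1
--     while i < len(ex) or j < len(en):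
--         ex_ready = i < len(ex) and ex[i][0] <= tc
--         en_ready = j < len(en) and en[j][0] <= tc
--         if not ex_ready and not en_ready:
--             # nothing can move: jump straight to the earliest waiting timestamp
--             nxt = ex[i][0] if i < len(ex) else en[j][0]
--             if j < len(en) and en[j][0] < nxt:
--                 nxt = en[j][0]
--             tc, last = nxt, -1
--         elif ex_ready and (last != 0 or not en_ready):
--             res[ex[i][1]] = tc
--             i += 1
--             tc, last = tc + 1, 1
--         else:
--             res[en[j][1]] = tc
--             j += 1
--             tc, last = tc + 1, 0
--     return res
-- ===== Notes on version B (the rewrite author's own statement) =====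
-- stated objective: faster
-- what changed: B replaces A's tick-by-tick while-loop with pop(0) on Python lists by index pointers into the two queues plus a single jump over idle time straight to the next waiting front timestamp, making the loop O(n) instead of O(n^2 + maxTime).
import Mathlib
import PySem

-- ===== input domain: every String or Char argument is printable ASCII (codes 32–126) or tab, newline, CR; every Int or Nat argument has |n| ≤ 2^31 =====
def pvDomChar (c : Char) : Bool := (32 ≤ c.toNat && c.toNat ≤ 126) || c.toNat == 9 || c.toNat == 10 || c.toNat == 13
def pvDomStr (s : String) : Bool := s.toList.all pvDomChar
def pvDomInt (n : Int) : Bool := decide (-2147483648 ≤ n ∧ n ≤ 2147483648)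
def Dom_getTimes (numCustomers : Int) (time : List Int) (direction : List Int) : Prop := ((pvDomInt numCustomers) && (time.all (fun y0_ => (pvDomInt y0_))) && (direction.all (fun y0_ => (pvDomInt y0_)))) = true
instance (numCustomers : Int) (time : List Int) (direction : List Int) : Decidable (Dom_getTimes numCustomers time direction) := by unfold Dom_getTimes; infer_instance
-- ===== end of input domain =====

-- B replaces A's tick-by-tick simulation with pop(0) by index pointers plus a single
-- jump over idle time to the next waiting timestamp (objective: faster).

-- shared small accessors: the queue front's timestamp / original index ([] cases are unreachable, guarded)
def pvHeadT (xs : List (Int × Int)) : Int := match xs with | [] => 0 | (t, _) :: _ => t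
def pvHeadI (xs : List (Int × Int)) : Int := match xs with | [] => 0 | (_, i) :: _ => i
-- the next waiting front timestamp (B's `nxt`; also the termination measure of both loops)
def pvNext (ex en : List (Int × Int)) : Int :=
  let n0 := if !ex.isEmpty then pvHeadT ex else pvHeadT en
  if !en.isEmpty && decide (pvHeadT en < n0) then pvHeadT en else n0

-- facts about pvNext cited by both termination arguments and by the equivalence proof
lemma pv_next_gt (ex en : List (Int × Int)) (tc : Int) (hne : ¬(ex = [] ∧ en = []))
    (hx : ex ≠ [] → tc < pvHeadT ex) (hy : en ≠ [] → tc < pvHeadT en) : tc < pvNext ex en := by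
  unfold pvNext
  cases ex with
  | nil =>
    cases en with
    | nil => exact absurd ⟨rfl, rfl⟩ hne
    | cons b m => have := hy (by simp); simp [pvHeadT] at this ⊢; exact this
  | cons a l =>
    cases en with
    | nil => have := hx (by simp); simp [pvHeadT] at this ⊢; omega
    | cons b m =>
      have h1 := hx (by simp); have h2 := hy (by simp)
      simp [pvHeadT] at h1 h2 ⊢
      split_ifs <;> omega

-- ===== PORT A =====
-- A's while loop: one step per unit of time, popping queue fronts
def loopA (ex en : List (Int × Int)) (res : List Int) (tc last : Int) : List Int :=
  if h0 : (ex.isEmpty && en.isEmpty) = true then res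
  else if hA : (!ex.isEmpty && decide (pvHeadT ex ≤ tc)
      && (decide (last = -1) || decide (last = 1) || en.isEmpty
          || (decide (last = 0) && decide (tc < pvHeadT en)))) = true then
    loopA ex.tail en (res.set (pvHeadI ex).toNat tc) (tc + 1) 1
  else if hB : (!en.isEmpty && decide (pvHeadT en ≤ tc)) = true then
    loopA ex en.tail (res.set (pvHeadI en).toNat tc) (tc + 1) 0
  else
    loopA ex en res (tc + 1) (-1)
termination_by (ex.length + en.length, (pvNext ex en - tc).toNat, if last = -1 then 0 else 1)
decreasing_by
  · apply Prod.Lex.left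
    cases ex with
    | nil => simp at hA
    | cons a l => simp only [List.tail_cons, List.length_cons]; omega
  · apply Prod.Lex.left
    cases en with
    | nil => simp at hB
    | cons a l => simp only [List.tail_cons, List.length_cons]; omega
  · apply Prod.Lex.right
    by_cases hl : last = -1
    · have hx : ex ≠ [] → tc < pvHeadT ex := by
        intro hne; by_contra hle; simp only [not_lt] at hle
        exact hA (by simp [hne, hle, hl])
      have hy : en ≠ [] → tc < pvHeadT en := by
        intro hne; by_contra hle; simp only [not_lt] at hle
        exact hB (by simp [hne, hle])
      have hne : ¬(ex = [] ∧ en = []) := by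
        rintro ⟨h1, h2⟩; exact h0 (by simp [h1, h2])
      have hgt := pv_next_gt ex en tc hne hx hy
      apply Prod.Lex.left
      omega
    · rcases Nat.lt_or_ge ((pvNext ex en - (tc + 1)).toNat) ((pvNext ex en - tc).toNat) with h | h
      · exact Prod.Lex.left _ _ h
      · have he : (pvNext ex en - (tc + 1)).toNat = (pvNext ex en - tc).toNat := by omega
        rw [he]
        apply Prod.Lex.right
        simp [hl]

def getTimes (numCustomers : Int) (time : List Int) (direction : List Int) : List Int :=
  -- en, ex from the for-loop over enumerate(time) with direction[i] / time[i] lookups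
  let p := (PySem.List.enumerate time 0).foldl
    (fun (p : List (Int × Int) × List (Int × Int)) it =>
      if ((PySem.List.pyGet? direction it.1).getD 0) == 1
      then (p.1, p.2 ++ [((PySem.List.pyGet? time it.1).getD 0, it.1)])
      else (p.1 ++ [((PySem.List.pyGet? time it.1).getD 0, it.1)], p.2))
    ([], [])
  loopA p.2 p.1 (List.replicate time.length 0) 0 (-1)

-- ===== PORT B =====
-- B's while loop: pointer advance (list tail) and a one-jump idle skip to pvNext
def loopB (ex en : List (Int × Int)) (res : List Int) (tc last : Int) : List Int :=
  if h0 : (ex.isEmpty && en.isEmpty) = true then res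
  else if hS : (!(!ex.isEmpty && decide (pvHeadT ex ≤ tc))
      && !(!en.isEmpty && decide (pvHeadT en ≤ tc))) = true then
    loopB ex en res (pvNext ex en) (-1)
  else if hX : (!ex.isEmpty && decide (pvHeadT ex ≤ tc)
      && (!decide (last = 0) || !(!en.isEmpty && decide (pvHeadT en ≤ tc)))) = true then
    loopB ex.tail en (res.set (pvHeadI ex).toNat tc) (tc + 1) 1
  else
    loopB ex en.tail (res.set (pvHeadI en).toNat tc) (tc + 1) 0
termination_by (ex.length + en.length, (pvNext ex en - tc).toNat)
decreasing_by
  · have hx : ex ≠ [] → tc < pvHeadT ex := by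
      intro hne; by_contra hle; simp only [not_lt] at hle
      simp [hne, hle] at hS
    have hy : en ≠ [] → tc < pvHeadT en := by
      intro hne; by_contra hle; simp only [not_lt] at hle
      simp [hne, hle] at hS
    have hne : ¬(ex = [] ∧ en = []) := by
      rintro ⟨h1, h2⟩; exact h0 (by simp [h1, h2])
    have hgt := pv_next_gt ex en tc hne hx hy
    apply Prod.Lex.right
    omega
  · apply Prod.Lex.left
    cases ex with
    | nil => simp at hX
    | cons a l => simp only [List.tail_cons, List.length_cons]; omega
  · apply Prod.Lex.left
    cases en with
    | nil =>
      exfalso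
      cases hex : ex.isEmpty <;> simp [hex] at h0 hS hX
      omega
    | cons a l => simp only [List.tail_cons, List.length_cons]; omega

def getTimes_alt (numCustomers : Int) (time : List Int) (direction : List Int) : List Int :=
  let l := PySem.List.enumerate (time.zip direction) 0
  let ex := (l.filter (fun it => it.2.2 == 1)).map (fun it => (it.2.1, it.1))
  let en := (l.filter (fun it => !(it.2.2 == 1))).map (fun it => (it.2.1, it.1))
  loopB ex en (List.replicate time.length 0) 0 (-1)

-- ===== PRECONDITION & SPEC =====
-- Pre_ excludes exactly the inputs where A raises IndexError: direction shorter than time.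
def Pre_getTimes (numCustomers : Int) (time : List Int) (direction : List Int) : Prop :=
  time.length ≤ direction.length
instance (numCustomers : Int) (time : List Int) (direction : List Int) : Decidable (Pre_getTimes numCustomers time direction) := by unfold Pre_getTimes; infer_instance
def pvWitness_getTimes : Int × List Int × List Int := (2, [0, 2], [1, 0])

def Spec_getTimes (numCustomers : Int) (time : List Int) (direction : List Int) (out : List Int) : Prop := out = getTimes_alt numCustomers time direction
instance (numCustomers : Int) (time : List Int) (direction : List Int) (out : List Int) : Decidable (Spec_getTimes numCustomers time direction out) := by unfold Spec_getTimes; infer_instance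

-- ===== CLAIM (what is proved, stated in full; the proofs are below) =====
def Claim_equal_getTimes : Prop := ∀ (numCustomers : Int) (time : List Int) (direction : List Int), Dom_getTimes numCustomers time direction → Pre_getTimes numCustomers time direction → Spec_getTimes numCustomers time direction (getTimes numCustomers time direction)

-- ===== LEMMAS AND PROOFS =====

lemma pv_next_le_ex (ex en : List (Int × Int)) (hx : ex ≠ []) : pvNext ex en ≤ pvHeadT ex := by
  unfold pvNext
  cases ex with
  | nil => exact absurd rfl hx
  | cons a l =>
    cases en with
    | nil => simp [pvHeadT]
    | cons b m => simp [pvHeadT]; split_ifs <;> omega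

lemma pv_next_le_en (ex en : List (Int × Int)) (hy : en ≠ []) : pvNext ex en ≤ pvHeadT en := by
  unfold pvNext
  cases en with
  | nil => exact absurd rfl hy
  | cons b m =>
    cases ex with
    | nil => simp [pvHeadT]
    | cons a l => simp [pvHeadT]; split_ifs <;> omega


lemma pv_enumerate_map {α β : Type} (f : α → β) (l : List α) (s : Int) :
    PySem.List.enumerate (l.map f) s = (PySem.List.enumerate l s).map (fun p => (p.1, f p.2)) := by
  induction l generalizing s with
  | nil => simp [PySem.List.enumerate_nil]
  | cons x xs ih => simp [PySem.List.enumerate_cons, ih]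

-- the partition phase of A equals B's two comprehensions (under Pre_)
lemma pv_build_eq (time direction : List Int) (hlen : time.length ≤ direction.length) :
    (PySem.List.enumerate time 0).foldl
      (fun (p : List (Int × Int) × List (Int × Int)) it =>
        if ((PySem.List.pyGet? direction it.1).getD 0) == 1
        then (p.1, p.2 ++ [((PySem.List.pyGet? time it.1).getD 0, it.1)])
        else (p.1 ++ [((PySem.List.pyGet? time it.1).getD 0, it.1)], p.2))
      ([], [])
    = (((PySem.List.enumerate (time.zip direction) 0).filter (fun it => !(it.2.2 == 1))).map (fun it => (it.2.1, it.1)),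
       ((PySem.List.enumerate (time.zip direction) 0).filter (fun it => it.2.2 == 1)).map (fun it => (it.2.1, it.1))) := by
  have hz : PySem.List.enumerate time 0
      = (PySem.List.enumerate (time.zip direction) 0).map (fun p => (p.1, p.2.1)) := by
    conv_lhs => rw [← List.map_fst_zip hlen, pv_enumerate_map]
  rw [hz, List.foldl_map]
  rw [PySem.List.foldl_congr_mem _ _
    (fun (p : List (Int × Int) × List (Int × Int)) (x : Int × (Int × Int)) =>
      ((fun (a : List (Int × Int)) (x : Int × (Int × Int)) =>
          if x.2.2 == 1 then a else a ++ [(x.2.1, x.1)]) p.1 x,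
       (fun (a : List (Int × Int)) (x : Int × (Int × Int)) =>
          if x.2.2 == 1 then a ++ [(x.2.1, x.1)] else a) p.2 x)) _ ?_]
  · rw [PySem.List.foldl_prod_mk
        (fun (a : List (Int × Int)) (x : Int × (Int × Int)) =>
          if x.2.2 == 1 then a else a ++ [(x.2.1, x.1)])
        (fun (a : List (Int × Int)) (x : Int × (Int × Int)) =>
          if x.2.2 == 1 then a ++ [(x.2.1, x.1)] else a)]
    refine congrArg₂ Prod.mk ?_ ?_
    · rw [PySem.List.foldl_congr_mem _ _
        (fun (a : List (Int × Int)) (x : Int × (Int × Int)) =>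
          if (!(x.2.2 == 1)) = true then a ++ [(x.2.1, x.1)] else a) _
        (by intro acc x _; cases h : (x.2.2 == 1) <;> simp [h])]
      rw [PySem.List.foldl_append_if]
      simp
    · rw [PySem.List.foldl_append_if]
      simp
  · intro acc x hx
    rcases (PySem.List.mem_enumerate_iff _ _ _).mp hx with ⟨k, hk, rfl⟩
    have hkt : k < time.length := by
      have := hk; rw [List.length_zip] at this; omega
    have hkd : k < direction.length := by
      have := hk; rw [List.length_zip] at this; omega
    have e1 : PySem.List.pyGet? direction ((0 : Int) + k) = some direction[k] := by
      simp [PySem.List.pyGet?_natCast, List.getElem?_eq_getElem hkd]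
    have e2 : PySem.List.pyGet? time ((0 : Int) + k) = some time[k] := by
      simp [PySem.List.pyGet?_natCast, List.getElem?_eq_getElem hkt]
    have e3 : (time.zip direction)[k] = (time[k], direction[k]) := List.getElem_zip
    simp only [e3, e1, e2, Option.getD_some]
    by_cases hd : (direction[k] == 1) = true <;> simp [hd]

-- under the invariant lastTurn ∈ {-1,0,1}, A's loop computes what B's loop computes
lemma pv_loop_eq (ex en : List (Int × Int)) (res : List Int) (tc last : Int)
    (hl : last = -1 ∨ last = 0 ∨ last = 1) :
    loopA ex en res tc last = loopB ex en res tc last := by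
  induction ex, en, res, tc, last using loopA.induct with
  | case1 ex en res tc last h0 =>
    rw [loopA, loopB]
    simp [h0]
  | case2 ex en res tc last h0 hA ih =>
    have hA' := hA
    simp only [Bool.and_eq_true, Bool.not_eq_true', Bool.or_eq_true, decide_eq_true_eq] at hA
    obtain ⟨⟨hxe, hxt⟩, hD⟩ := hA
    have hSf : (!(!ex.isEmpty && decide (pvHeadT ex ≤ tc))
        && !(!en.isEmpty && decide (pvHeadT en ≤ tc))) = false := by
      simp [hxe, hxt]
    have hXt : (!ex.isEmpty && decide (pvHeadT ex ≤ tc)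
        && (!decide (last = 0) || !(!en.isEmpty && decide (pvHeadT en ≤ tc)))) = true := by
      rcases hD with ((h | h) | h) | ⟨h1, h2⟩
      · simp [hxe, hxt, h]
      · simp [hxe, hxt, h]
      · simp [hxe, hxt, h]
      · have hnle : ¬ (pvHeadT en ≤ tc) := by omega
        simp [hxe, hxt, h1, hnle]
    rw [loopA, loopB, dif_neg h0, dif_pos hA', dif_neg h0, dif_neg (by simp only [hSf]; exact Bool.false_ne_true), dif_pos hXt]
    exact ih (by tauto)
  | case3 ex en res tc last h0 hA hB ih =>
    have hB' := hB
    simp only [Bool.and_eq_true, Bool.not_eq_true', decide_eq_true_eq] at hB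
    obtain ⟨hye, hyt⟩ := hB
    have hSf : (!(!ex.isEmpty && decide (pvHeadT ex ≤ tc))
        && !(!en.isEmpty && decide (pvHeadT en ≤ tc))) = false := by
      simp [hye, hyt]
    have hXf : (!ex.isEmpty && decide (pvHeadT ex ≤ tc)
        && (!decide (last = 0) || !(!en.isEmpty && decide (pvHeadT en ≤ tc)))) = false := by
      by_cases hl0 : last = 0
      · simp [hl0, hye, hyt]
      · cases hxe : ex.isEmpty with
        | true => simp
        | false =>
          by_cases hxt : pvHeadT ex ≤ tc
          · exfalso
            apply hA
            rcases hl with h | h | h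
            · simp [hxe, hxt, h]
            · exact absurd h hl0
            · simp [hxe, hxt, h]
          · simp [hxt]
    rw [loopA, loopB, dif_neg h0, dif_neg hA, dif_pos hB', dif_neg h0,
      dif_neg (by simp only [hSf]; exact Bool.false_ne_true), dif_neg (by simp only [hXf]; exact Bool.false_ne_true)]
    exact ih (by tauto)
  | case4 ex en res tc last h0 hA hB ih =>
    have hyp : en = [] ∨ tc < pvHeadT en := by
      cases hye : en.isEmpty with
      | true => exact Or.inl (by simpa using hye)
      | false =>
        right
        by_contra hle
        simp only [not_lt] at hle
        exact hB (by simp [hye, hle])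
    have hxp : ex = [] ∨ tc < pvHeadT ex := by
      cases hxe : ex.isEmpty with
      | true => exact Or.inl (by simpa using hxe)
      | false =>
        right
        by_contra hle
        simp only [not_lt] at hle
        apply hA
        rcases hl with h | h | h
        · simp [hxe, hle, h]
        · -- last = 0: from ¬hB, en is empty or its front is late; both make A's disjunction true
          rcases hyp with hy | hy
          · simp [hxe, hle, h, hy]
          · simp [hxe, hle, h, hy]
        · simp [hxe, hle, h]
    have hne : ¬(ex = [] ∧ en = []) := by
      rintro ⟨h1, h2⟩; exact h0 (by simp [h1, h2])
    have hgt : tc < pvNext ex en :=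
      pv_next_gt ex en tc hne (fun h => hxp.resolve_left h) (fun h => hyp.resolve_left h)
    have hSx : (!ex.isEmpty && decide (pvHeadT ex ≤ tc)) = false := by
      rcases hxp with h | h
      · simp [h]
      · simp; intro _; omega
    have hSy : (!en.isEmpty && decide (pvHeadT en ≤ tc)) = false := by
      rcases hyp with h | h
      · simp [h]
      · simp; intro _; omega
    have hSt : (!(!ex.isEmpty && decide (pvHeadT ex ≤ tc))
        && !(!en.isEmpty && decide (pvHeadT en ≤ tc))) = true := by
      simp [hSx, hSy]
    rw [loopA, loopB, dif_neg h0, dif_neg hA, dif_neg hB, dif_neg h0, dif_pos hSt]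
    rw [ih (by tauto)]
    -- loopB at tc+1 either is already at pvNext or skips straight to it
    by_cases he : tc + 1 = pvNext ex en
    · rw [he]
    · have hSx1 : (!ex.isEmpty && decide (pvHeadT ex ≤ tc + 1)) = false := by
        cases hxe : ex.isEmpty with
        | true => simp
        | false =>
          have hle := pv_next_le_ex ex en (by simpa using hxe)
          simp
          omega
      have hSy1 : (!en.isEmpty && decide (pvHeadT en ≤ tc + 1)) = false := by
        cases hye : en.isEmpty with
        | true => simp
        | false =>
          have hle := pv_next_le_en ex en (by simpa using hye)
          simp
          omega
      have hSt1 : (!(!ex.isEmpty && decide (pvHeadT ex ≤ tc + 1))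
          && !(!en.isEmpty && decide (pvHeadT en ≤ tc + 1))) = true := by
        simp [hSx1, hSy1]
      conv_lhs => rw [loopB]
      rw [dif_neg h0, dif_pos hSt1]

-- ===== VERDICT (by name: the statement is the Claim_ definition above) =====
theorem getTimes_spec : Claim_equal_getTimes := by
  intro numCustomers time direction _ hpre
  unfold Spec_getTimes getTimes getTimes_alt
  rw [pv_build_eq time direction hpre]
  exact pv_loop_eq _ _ _ _ _ (Or.inl rfl)
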